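-- pv_equiv track=rewrite | github.com/Angel-Suescun/Reto_1 | Reto#01_4.py | sumatoria_mayor
-- ===== SOURCE A (Python) =====
-- def sumatoria_mayor(numeros: list) -> list:
--
--     suma_mayor = 0
--     numeros_mayor = []
--
--     for i in range(len(numeros) - 1):
--         suma = numeros[i] + numeros[i + 1]
--         if suma > suma_mayor:
--             suma_mayor = suma
--             numeros_mayor = [numeros[i], numeros[i + 1], suma_mayor]
--
--     return numeros_mayor
-- ===== SOURCE B (Python) =====
-- def sumatoria_mayor(numeros: list) -> list:
--     # Divide and conquer: split the list into two halves overlapping by one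
--     # element (so every adjacent pair lives in exactly one half), recursively
--     # find each half's best adjacent pair (leftmost on ties), combine, and
--     # keep the winner only if its sum is strictly positive.
--     def mejor(xs):
--         n = len(xs)
--         if n < 2:
--             return None
--         if n == 2:
--             return (xs[0], xs[1], xs[0] + xs[1])
--         k = n // 2
--         izq = mejor(xs[:k + 1])
--         der = mejor(xs[k:])
--         if izq is None:
--             return der
--         if der is not None and der[2] > izq[2]:
--             return der
--         return izq
--
--     m = mejor(numeros)
--     if m is not None and m[2] > 0:
--         return [m[0], m[1], m[2]]
--     return []
-- ===== Notes on version B (the rewrite author's own statement) =====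
-- stated objective: alternative
-- what changed: A finds the best adjacent pair in one fused index loop with a running 0 baseline; B uses a divide-and-conquer recursion that splits the list into two halves overlapping by one element, recursively selects each half's best adjacent pair and combines them preferring the left one on ties, testing positivity once at the end.
import Mathlib
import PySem

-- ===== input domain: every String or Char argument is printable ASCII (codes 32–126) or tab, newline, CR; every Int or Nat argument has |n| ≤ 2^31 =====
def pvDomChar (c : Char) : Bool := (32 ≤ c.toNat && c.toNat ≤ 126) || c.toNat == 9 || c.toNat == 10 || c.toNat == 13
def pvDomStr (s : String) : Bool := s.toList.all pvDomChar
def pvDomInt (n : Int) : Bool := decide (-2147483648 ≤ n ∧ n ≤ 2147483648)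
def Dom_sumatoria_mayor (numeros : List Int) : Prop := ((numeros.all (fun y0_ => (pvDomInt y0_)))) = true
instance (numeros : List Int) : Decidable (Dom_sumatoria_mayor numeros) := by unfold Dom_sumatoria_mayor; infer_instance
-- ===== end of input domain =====

-- B replaces A's fused single scan by a divide-and-conquer recursion: split into two
-- halves overlapping by one element, recursively take each half's best adjacent pair,
-- combine preferring the left one on ties (alternative algorithm, not faster).

-- ===== PORT A =====
def sumatoria_mayor (numeros : List Int) : List Int :=
  let st := (PySem.List.pyRange 0 ((numeros.length : Int) - 1) 1).foldl
    (fun (st : Int × List Int) i =>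
      let suma := PySem.List.pyGetD numeros i 0 + PySem.List.pyGetD numeros (i + 1) 0
      if suma > st.1 then
        (suma, [PySem.List.pyGetD numeros i 0, PySem.List.pyGetD numeros (i + 1) 0, suma])
      else st)
    (0, [])
  st.2

-- ===== PORT B =====
-- combine: left result, unless the right one is strictly better (Python's
-- 'if izq is None … if der is not None and der[2] > izq[2] …' chain)
def pvMejorComb (izq der : Option (Int × Int × Int)) : Option (Int × Int × Int) :=
  match izq, der with
  | none, d => d
  | some l, none => some l
  | some l, some r => if r.2.2 > l.2.2 then some r else some l

-- recursive helper 'mejor' of Source B (xs[:k+1] / xs[k:] ported as take/drop)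
def pvMejor : List Int → Option (Int × Int × Int)
  | [] => none
  | [_] => none
  | [a, b] => some (a, b, a + b)
  | x :: y :: z :: rest =>
      let xs := x :: y :: z :: rest
      let k := xs.length / 2
      pvMejorComb (pvMejor (xs.take (k + 1))) (pvMejor (xs.drop k))
termination_by xs => xs.length
decreasing_by
  · simp only [List.length_take]; simp; omega
  · simp only [List.length_drop]; simp; omega

def sumatoria_mayor_alt (numeros : List Int) : List Int :=
  match pvMejor numeros with
  | some m => if m.2.2 > 0 then [m.1, m.2.1, m.2.2] else []
  | none => []

-- ===== PRECONDITION & SPEC =====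
def Spec_sumatoria_mayor (numeros : List Int) (out : List Int) : Prop := out = sumatoria_mayor_alt numeros
instance (numeros : List Int) (out : List Int) : Decidable (Spec_sumatoria_mayor numeros out) := by unfold Spec_sumatoria_mayor; infer_instance

-- ===== CLAIM (what is proved, stated in full; the proofs are below) =====
def Claim_equal_sumatoria_mayor : Prop := ∀ (numeros : List Int), Dom_sumatoria_mayor numeros → Spec_sumatoria_mayor numeros (sumatoria_mayor numeros)

-- ===== LEMMAS AND PROOFS =====

-- adjacent-pair table
def pvPares (xs : List Int) : List (Int × Int × Int) :=
  List.zipWith (fun a b => (a, b, a + b)) xs (xs.drop 1)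

-- A's loop step on a triple (a, b, a+b)
def pvFA (st : Int × List Int) (t : Int × Int × Int) : Int × List Int :=
  if t.2.2 > st.1 then (t.2.2, [t.1, t.2.1, t.2.2]) else st

-- leftmost-max selection step
def pvFB (m u : Int × Int × Int) : Int × Int × Int := if u.2.2 > m.2.2 then u else m

-- linear leftmost-max selection over a table
def pvLinSel : List (Int × Int × Int) → Option (Int × Int × Int)
  | [] => none
  | t :: rest => some (rest.foldl pvFB t)

-- the A-state represented by a current best triple
def pvSS (m : Int × Int × Int) : Int × List Int :=
  if m.2.2 > 0 then (m.2.2, [m.1, m.2.1, m.2.2]) else (0, [])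

theorem pvFA_pvSS (m t : Int × Int × Int) : pvFA (pvSS m) t = pvSS (pvFB m t) := by
  unfold pvFA pvFB pvSS
  split_ifs <;> first | rfl | omega

theorem pv_foldl_FA (l : List (Int × Int × Int)) (m : Int × Int × Int) :
    l.foldl pvFA (pvSS m) = pvSS (l.foldl pvFB m) := by
  induction l generalizing m with
  | nil => rfl
  | cons t l ih => simp only [List.foldl_cons, pvFA_pvSS, ih]

theorem pvFB_assoc (a b c : Int × Int × Int) : pvFB (pvFB a b) c = pvFB a (pvFB b c) := by
  unfold pvFB
  split_ifs <;> first | rfl | omega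

theorem foldl_pvFB_assoc (m r : Int × Int × Int) (R : List (Int × Int × Int)) :
    R.foldl pvFB (pvFB m r) = pvFB m (R.foldl pvFB r) := by
  induction R generalizing r with
  | nil => rfl
  | cons u R ih => simp only [List.foldl_cons, pvFB_assoc, ih]

theorem pvLinSel_append (L R : List (Int × Int × Int)) :
    pvLinSel (L ++ R) = pvMejorComb (pvLinSel L) (pvLinSel R) := by
  cases L with
  | nil => cases R <;> rfl
  | cons t rest =>
    cases R with
    | nil => simp [pvLinSel, pvMejorComb]
    | cons r R' =>
      simp only [List.cons_append, pvLinSel, List.foldl_append, List.foldl_cons]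
      rw [foldl_pvFB_assoc]
      simp only [pvMejorComb, pvFB]
      split_ifs <;> rfl

theorem pvPares_cons (a b : Int) (t : List Int) :
    pvPares (a :: b :: t) = (a, b, a + b) :: pvPares (b :: t) := by
  simp [pvPares]

theorem pvPares_take (xs : List Int) (k : Nat) :
    pvPares (xs.take (k + 1)) = (pvPares xs).take k := by
  induction k generalizing xs with
  | zero => rcases xs with _ | ⟨a, _ | ⟨b, t⟩⟩ <;> simp [pvPares]
  | succ k ih =>
    rcases xs with _ | ⟨a, _ | ⟨b, t⟩⟩
    · simp [pvPares]
    · simp [pvPares]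
    · rw [List.take_succ_cons, List.take_succ_cons, pvPares_cons, pvPares_cons,
        List.take_succ_cons]
      congr 1
      rw [← ih (b :: t), List.take_succ_cons]

theorem pvPares_drop (xs : List Int) (k : Nat) :
    pvPares (xs.drop k) = (pvPares xs).drop k := by
  induction k generalizing xs with
  | zero => simp
  | succ k ih =>
    rcases xs with _ | ⟨a, _ | ⟨b, t⟩⟩
    · simp [pvPares]
    · simp [pvPares]
    · rw [List.drop_succ_cons, pvPares_cons, List.drop_succ_cons]
      exact ih (b :: t)

theorem pvMejor_eq_linSel (xs : List Int) : pvMejor xs = pvLinSel (pvPares xs) := by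
  induction xs using pvMejor.induct with
  | case1 => simp [pvMejor, pvPares, pvLinSel]
  | case2 a => simp [pvMejor, pvPares, pvLinSel]
  | case3 a b => simp [pvMejor, pvPares, pvLinSel, List.foldl]
  | case4 x y z rest xs0 k0 ih1 ih2 =>
    rw [pvMejor]
    rw [ih1, ih2, pvPares_take, pvPares_drop, ← pvLinSel_append, List.take_append_drop]

-- A's index fold equals the fold of pvFA over the triple table
theorem pv_index_fold (numeros : List Int) :
    (PySem.List.pyRange 0 ((numeros.length : Int) - 1) 1).foldl
      (fun st i => pvFA st (PySem.List.pyGetD numeros i 0, PySem.List.pyGetD numeros (i + 1) 0,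
        PySem.List.pyGetD numeros i 0 + PySem.List.pyGetD numeros (i + 1) 0)) (0, ([] : List Int))
    = (pvPares numeros).foldl pvFA (0, []) := by
  set pares := pvPares numeros with hp
  rcases numeros with _ | ⟨a, numeros⟩
  · simp [PySem.List.pyRange, hp, pvPares]
  · have hlen : pares.length = numeros.length := by
      simp [hp, pvPares, List.length_zipWith]
    have hbnd : ((a :: numeros).length : Int) - 1 = (pares.length : Int) := by
      simp [hlen]
    rw [hbnd]
    rw [PySem.List.foldl_congr_mem
      (g := fun st i => pvFA st (PySem.List.pyGetD pares i (0, 0, 0)))]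
    · exact PySem.List.foldl_pyRange_zero_pyGetD' pares (0, 0, 0) pvFA (0, [])
    · intro acc i hi
      rw [PySem.List.mem_pyRange_one] at hi
      obtain ⟨h0, hlt⟩ := hi
      have hiN : i.toNat < pares.length := by omega
      have hi1 : i = (i.toNat : Int) := by omega
      congr 1
      rw [hi1, PySem.List.pyGetD_natCast, PySem.List.pyGetD_natCast]
      have h2 : ((i.toNat : Int) + 1) = ((i.toNat + 1 : Nat) : Int) := by push_cast; ring
      rw [h2, PySem.List.pyGetD_natCast]
      have hm := hiN
      simp only [hp, pvPares, List.length_zipWith, List.length_drop] at hm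
      have hL1 : i.toNat < (a :: numeros).length := by omega
      have hL2 : i.toNat + 1 < (a :: numeros).length := by omega
      rw [List.getD_eq_getElem _ _ hL1, List.getD_eq_getElem _ _ hL2,
        List.getD_eq_getElem _ _ hiN]
      simp [hp, pvPares, List.getElem_zipWith]

-- ===== VERDICT (by name: the statement is the Claim_ definition above) =====
theorem sumatoria_mayor_spec : Claim_equal_sumatoria_mayor := by
  intro numeros _
  unfold Spec_sumatoria_mayor sumatoria_mayor
  have hA := pv_index_fold numeros
  simp only [pvFA] at hA
  rw [hA]
  rw [sumatoria_mayor_alt, pvMejor_eq_linSel]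
  rcases hz : pvPares numeros with _ | ⟨t, rest⟩
  · simp [pvLinSel]
  · rw [List.foldl_cons]
    have h0 : pvFA (0, []) t = pvSS t := by unfold pvFA pvSS; rfl
    rw [h0, pv_foldl_FA]
    simp only [pvLinSel]
    unfold pvSS
    split_ifs <;> rfl
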